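-- pv_equiv track=rewrite | github.com/NicholasACTran/bank-failure-data-vis | visualization.py | name_split
-- ===== SOURCE A (Python) =====
-- def name_split(x):
--     # Annoying long name cleaning
--     if x == 'First National Bank, also operating as The National Bank of El Paso':
--         x = 'The National Bank of El Paso'
--     tokens = x.split()
--     parity = True
--     name = ''
--     for token in tokens:
--         name = f'{name}{token} ' if parity else f'{name}{token}\n'
--         parity = not parity
--     return name.rstrip()
-- ===== SOURCE B (Python) =====
-- def name_split(x):
--     # Annoying long name cleaning
--     if x == 'First National Bank, also operating as The National Bank of El Paso':
--         x = 'The National Bank of El Paso'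
--     tokens = x.split()
--     lines = []
--     i = 0
--     while i < len(tokens):
--         lines.append(' '.join(tokens[i:i + 2]))
--         i += 2
--     return '\n'.join(lines)
-- ===== Notes on version B (the rewrite author's own statement) =====
-- stated objective: simpler
-- what changed: Instead of a parity-flag fold that appends a trailing separator after every token and then rstrips it away, B groups the tokens two at a time into lines and joins the lines with newlines, so no trailing separator ever exists.
import Mathlib
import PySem

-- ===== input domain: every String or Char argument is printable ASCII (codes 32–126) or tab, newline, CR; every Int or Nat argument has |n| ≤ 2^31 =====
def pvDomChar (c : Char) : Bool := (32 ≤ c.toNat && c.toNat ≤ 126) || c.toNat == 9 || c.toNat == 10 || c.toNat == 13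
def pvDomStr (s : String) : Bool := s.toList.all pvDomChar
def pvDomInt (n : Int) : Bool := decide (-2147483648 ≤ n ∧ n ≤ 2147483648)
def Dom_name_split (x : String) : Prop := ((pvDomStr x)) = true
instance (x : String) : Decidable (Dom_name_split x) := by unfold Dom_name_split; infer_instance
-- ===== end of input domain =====

-- B groups tokens two at a time into lines and joins with '\n', instead of A's
-- parity-flag fold with trailing-separator rstrip; objective: simpler.

-- ===== PORT A =====
def name_split (x : String) : String :=
  let x := if x = "First National Bank, also operating as The National Bank of El Paso"
           then "The National Bank of El Paso" else x
  let tokens := PySem.Str.split₀ x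
  let st := tokens.foldl
    (fun (st : String × Bool) token =>
      (if st.2 then st.1 ++ token ++ " " else st.1 ++ token ++ "\n", !st.2))
    ("", true)
  PySem.Str.rstrip st.1

-- ===== PORT B =====
-- the while loop over i (two at a time, ' '.join(tokens[i:i+2])) as two-step recursion
def pairLines : List String → List String
  | [] => []
  | [a] => [PySem.Str.join " " [a]]
  | a :: b :: rest => PySem.Str.join " " [a, b] :: pairLines rest

def name_split_alt (x : String) : String :=
  let x := if x = "First National Bank, also operating as The National Bank of El Paso"
           then "The National Bank of El Paso" else x
  let tokens := PySem.Str.split₀ x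
  PySem.Str.join "\n" (pairLines tokens)

-- ===== PRECONDITION & SPEC =====
def Spec_name_split (x : String) (out : String) : Prop := out = name_split_alt x
instance (x : String) (out : String) : Decidable (Spec_name_split x out) := by unfold Spec_name_split; infer_instance

-- ===== CLAIM (what is proved, stated in full; the proofs are below) =====
def Claim_equal_name_split : Prop := ∀ (x : String), Dom_name_split x → Spec_name_split x (name_split x)

-- ===== LEMMAS AND PROOFS =====

-- every token produced by split₀ is nonempty and contains no whitespace
theorem split₀_go_tokens (s cur : List Char) (acc : List (List Char))
    (hcur : ∀ c ∈ cur, PySem.Chars.isspace c = false)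
    (hacc : ∀ t ∈ acc, t ≠ [] ∧ ∀ c ∈ t, PySem.Chars.isspace c = false) :
    ∀ t ∈ PySem.Chars.split₀.go s cur acc, t ≠ [] ∧ ∀ c ∈ t, PySem.Chars.isspace c = false := by
  induction s generalizing cur acc with
  | nil =>
    intro t ht
    unfold PySem.Chars.split₀.go at ht
    split at ht
    · exact hacc t (List.mem_reverse.mp ht)
    · rcases List.mem_cons.mp (List.mem_reverse.mp ht) with h | h
      · subst h
        constructor
        · simp_all [List.isEmpty_iff]
        · intro c hc
          exact hcur c (List.mem_reverse.mp hc)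
      · exact hacc t h
  | cons c rest ih =>
    intro t ht
    unfold PySem.Chars.split₀.go at ht
    by_cases hsp : PySem.Chars.isspace c = true
    · simp only [hsp, if_true] at ht
      split at ht
      · exact ih [] acc (by simp) hacc t ht
      · refine ih [] (cur.reverse :: acc) (by simp) ?_ t ht
        intro u hu
        rcases List.mem_cons.mp hu with h | h
        · subst h
          refine ⟨by simp_all [List.isEmpty_iff], ?_⟩
          intro d hd; exact hcur d (List.mem_reverse.mp hd)
        · exact hacc u h
    · simp only [hsp] at ht
      refine ih (c :: cur) acc ?_ hacc t ht
      intro d hd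
      rcases List.mem_cons.mp hd with h | h
      · simp_all
      · exact hcur d h

theorem split₀_tokens (s : List Char) :
    ∀ t ∈ PySem.Chars.split₀ s, t ≠ [] ∧ ∀ c ∈ t, PySem.Chars.isspace c = false :=
  split₀_go_tokens s [] [] (by simp) (by simp)

-- the pair-lines / join core of B on char lists
def pairJoin : List (List Char) → List Char
  | [] => []
  | [a] => a
  | a :: b :: rest => a ++ [' '] ++ b ++ (if rest.isEmpty then [] else '\n' :: pairJoin rest)

def pairLinesC : List (List Char) → List (List Char)
  | [] => []
  | [a] => [a]
  | a :: b :: rest => (a ++ [' '] ++ b) :: pairLinesC rest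

theorem toList_space : (" " : String).toList = [' '] := by decide
theorem toList_nl : ("\n" : String).toList = ['\n'] := by decide

theorem pairLines_toList (ts : List (List Char)) :
    (pairLines (ts.map String.ofList)).map String.toList = pairLinesC ts := by
  induction ts using pairLinesC.induct with
  | case1 => simp [pairLines, pairLinesC]
  | case2 a =>
    simp [pairLines, pairLinesC, PySem.Str.toList_join, toList_space,
          PySem.Chars.join_singleton]
  | case3 a b rest ih =>
    simp [pairLines, pairLinesC, PySem.Str.toList_join, toList_space, ih,
          PySem.Chars.join_cons_cons, PySem.Chars.join_singleton]

theorem pairLinesC_ne_nil (a : List Char) (ts : List (List Char)) : pairLinesC (a :: ts) ≠ [] := by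
  cases ts <;> simp [pairLinesC]

theorem join_pairLinesC (ts : List (List Char)) :
    PySem.Chars.join ['\n'] (pairLinesC ts) = pairJoin ts := by
  induction ts using pairLinesC.induct with
  | case1 => simp [pairLinesC, pairJoin, PySem.Chars.join_nil]
  | case2 a => simp [pairLinesC, pairJoin, PySem.Chars.join_singleton]
  | case3 a b rest ih =>
    cases rest with
    | nil => simp [pairLinesC, pairJoin, PySem.Chars.join_singleton]
    | cons c r =>
      cases h : pairLinesC (c :: r) with
      | nil => exact absurd h (pairLinesC_ne_nil c r)
      | cons l ls =>
        rw [pairLinesC, h, PySem.Chars.join_cons_cons, ← h, ih]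
        simp [pairJoin]

-- A's fold result characterized: trailing separator after pairJoin
theorem fold_char (ts : List (List Char)) (hne : ts ≠ [])
    (n : String) :
    (List.foldl
      (fun (st : String × Bool) token =>
        (if st.2 then st.1 ++ token ++ " " else st.1 ++ token ++ "\n", !st.2))
      (n, true) (ts.map String.ofList)).1.toList
    = n.toList ++ pairJoin ts ++ [if ts.length % 2 = 1 then ' ' else '\n'] := by
  induction ts using pairJoin.induct generalizing n with
  | case1 => simp at hne
  | case2 a => simp [pairJoin, toList_space]
  | case3 a b rest ih =>
    cases rest with
    | nil => simp [pairJoin, toList_space, toList_nl]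
    | cons c r =>
      rw [List.map_cons, List.map_cons, List.foldl_cons, List.foldl_cons]
      simp only [reduceIte, Bool.not_true, Bool.not_false, Bool.false_eq_true, if_false]
      rw [ih (by simp) (n ++ String.ofList a ++ " " ++ String.ofList b ++ "\n")]
      have hpar : (c :: r).length % 2 = (a :: b :: c :: r).length % 2 := by
        simp; omega
      rw [hpar]
      simp [pairJoin, toList_space, toList_nl]

-- rstrip removes exactly one trailing whitespace char when the rest ends non-space
theorem rstrip_append_space (l : List Char) (c : Char) (h : PySem.Chars.isspace c = true) :
    PySem.Chars.rstrip (l ++ [c]) = PySem.Chars.rstrip l := by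
  simp [PySem.Chars.rstrip, h]

theorem rstrip_of_last (l : List Char) (c : Char) (h : PySem.Chars.isspace c = false) :
    PySem.Chars.rstrip (l ++ [c]) = l ++ [c] := by
  simp [PySem.Chars.rstrip, h]

-- pairJoin of nonempty, space-free tokens ends in a non-space char (or is a lone token)
theorem pairJoin_last (ts : List (List Char)) (hne : ts ≠ [])
    (htok : ∀ t ∈ ts, t ≠ [] ∧ ∀ c ∈ t, PySem.Chars.isspace c = false) :
    ∃ l c, pairJoin ts = l ++ [c] ∧ PySem.Chars.isspace c = false := by
  induction ts using pairJoin.induct with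
  | case1 => simp at hne
  | case2 a =>
    obtain ⟨ha, hs⟩ := htok a (by simp)
    refine ⟨a.dropLast, a.getLast ha, ?_, hs _ (List.getLast_mem ha)⟩
    simp [pairJoin, List.dropLast_append_getLast ha]
  | case3 a b rest ih =>
    cases rest with
    | nil =>
      obtain ⟨hb, hs⟩ := htok b (by simp)
      refine ⟨a ++ [' '] ++ b.dropLast, b.getLast hb, ?_, hs _ (List.getLast_mem hb)⟩
      simp [pairJoin, List.dropLast_append_getLast hb]
    | cons d r =>
      obtain ⟨l, c, hl, hc⟩ := ih (by simp) (by intro t ht; exact htok t (by simp [ht]))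
      refine ⟨a ++ [' '] ++ b ++ '\n' :: l, c, ?_, hc⟩
      simp [pairJoin, hl]

-- ===== VERDICT (by name: the statement is the Claim_ definition above) =====
theorem name_split_spec : Claim_equal_name_split := by
  intro x _
  unfold Spec_name_split name_split name_split_alt
  set y := if x = "First National Bank, also operating as The National Bank of El Paso"
           then "The National Bank of El Paso" else x with hy
  apply String.toList_inj.mp
  have htok := split₀_tokens y.toList
  have hmap : PySem.Str.split₀ y = (PySem.Chars.split₀ y.toList).map String.ofList := by
    have h := congrArg (List.map String.ofList) (PySem.Str.split₀_map_toList y)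
    rw [List.map_map] at h
    rw [show (String.ofList ∘ String.toList) = id from funext (fun s => String.ofList_toList),
        List.map_id] at h
    exact h
  simp only [hmap]
  cases hts : PySem.Chars.split₀ y.toList with
  | nil => decide
  | cons t ts =>
    rw [← hts]
    have hne : PySem.Chars.split₀ y.toList ≠ [] := by simp [hts]
    rw [PySem.Str.toList_rstrip, fold_char _ hne ""]
    obtain ⟨l, c, hl, hc⟩ := pairJoin_last _ hne htok
    have hsep : PySem.Chars.isspace (if (PySem.Chars.split₀ y.toList).length % 2 = 1 then ' ' else '\n') = true := by
      split <;> decide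
    rw [show ("" : String).toList = ([] : List Char) from by decide, List.nil_append,
        rstrip_append_space _ _ hsep, hl, rstrip_of_last _ _ hc, ← hl]
    rw [PySem.Str.toList_join, toList_nl, pairLines_toList, join_pairLinesC]
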